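-- pv_equiv track=rewrite | github.com/fernando-mota-1/interview-prep | strings/matching_pairs.py | matching_pairs
-- ===== SOURCE A (Python) =====
-- from itertools import combinations
--
-- def matching_pairs(s, t):
--   # Write your code here
--   combos = combinations(range(len(s)), 2)
--   c = list(combos)
--   counter = [0]*len(c)
--   for ind,(i,j) in enumerate(c):
--     new_s = s[:i] + s[j] + s[i+1:j] + s[i]+ s[j+1:]
--     for k, val in enumerate(t):
--       if new_s[k] == val:
--         counter[ind] += 1
--   return max(counter)
-- ===== SOURCE B (Python) =====
-- def matching_pairs(s, t):
--     m = len(t)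
--     base = 0
--     for k in range(m):
--         if s[k] == t[k]:
--             base += 1
--     n = len(s)
--     best = None
--     for i in range(n):
--         for j in range(i + 1, n):
--             d = 0
--             if i < m:
--                 d += (1 if s[j] == t[i] else 0) - (1 if s[i] == t[i] else 0)
--             if j < m:
--                 d += (1 if s[i] == t[j] else 0) - (1 if s[j] == t[j] else 0)
--             if best is None or d > best:
--                 best = d
--     return base + best
-- ===== Notes on version B (the rewrite author's own statement) =====
-- stated objective: faster
-- what changed: B computes the base match count once and evaluates each swap as an O(1) delta at the two swapped positions, instead of rebuilding the swapped string and rescanning all of t for every pair.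
import Mathlib
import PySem

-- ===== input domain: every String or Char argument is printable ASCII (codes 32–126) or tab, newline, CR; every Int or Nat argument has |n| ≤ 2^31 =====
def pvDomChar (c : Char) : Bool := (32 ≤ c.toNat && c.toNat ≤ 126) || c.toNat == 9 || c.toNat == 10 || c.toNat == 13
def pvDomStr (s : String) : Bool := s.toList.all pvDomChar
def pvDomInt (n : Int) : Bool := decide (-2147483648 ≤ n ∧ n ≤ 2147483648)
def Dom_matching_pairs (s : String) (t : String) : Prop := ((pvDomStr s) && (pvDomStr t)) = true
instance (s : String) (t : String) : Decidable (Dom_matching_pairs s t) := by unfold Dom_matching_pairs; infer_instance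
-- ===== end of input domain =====

-- B replaces A's per-pair string rebuild and full rescan of t by one precomputed base match count plus an O(1) delta per swap.

-- ===== PORT A =====
-- itertools.combinations(xs, 2) in iteration order
def pvCombos2 (xs : List Int) : List (Int × Int) :=
  match xs with
  | [] => []
  | x :: rest => rest.map (fun y => (x, y)) ++ pvCombos2 rest

def matching_pairs (s : String) (t : String) : Int :=
  let ls := s.toList
  let lt := t.toList
  let c := pvCombos2 (PySem.List.pyRange 0 (PySem.Str.len s) 1)
  let counter := c.map (fun p =>
    let i := p.1
    let j := p.2
    let new_s := PySem.List.slice ls none (some i) ++ [PySem.List.pyGetD ls j ' ']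
      ++ PySem.List.slice ls (some (i + 1)) (some j) ++ [PySem.List.pyGetD ls i ' ']
      ++ PySem.List.slice ls (some (j + 1)) none
    (PySem.List.enumerate lt 0).foldl (fun acc kv =>
      if PySem.List.pyGet? new_s kv.1 = some kv.2 then acc + 1 else acc) 0)
  (PySem.List.max? counter (fun x => x)).getD 0   -- max(counter); empty counter (len(s) < 2) raises in Python, excluded by Pre_

-- ===== PORT B =====
-- 'if best is None or d > best: best = d'
def pvUpdMax (b : Option Int) (d : Int) : Option Int :=
  match b with
  | none => some d
  | some x => if x < d then some d else some x

-- the value of d computed for the pair (i, j) in B's inner loop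
def pvSwapDelta (ls lt : List Char) (m i j : Int) : Int :=
  (if i < m then (if PySem.List.pyGet? ls j = PySem.List.pyGet? lt i then (1:Int) else 0)
            - (if PySem.List.pyGet? ls i = PySem.List.pyGet? lt i then (1:Int) else 0) else 0)
  + (if j < m then (if PySem.List.pyGet? ls i = PySem.List.pyGet? lt j then (1:Int) else 0)
              - (if PySem.List.pyGet? ls j = PySem.List.pyGet? lt j then (1:Int) else 0) else 0)

def matching_pairs_alt (s : String) (t : String) : Int :=
  let ls := s.toList
  let lt := t.toList
  let m := PySem.Str.len t
  let n := PySem.Str.len s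
  let base := (PySem.List.pyRange 0 m 1).foldl (fun acc k =>
    if PySem.List.pyGet? ls k = PySem.List.pyGet? lt k then acc + 1 else acc) 0
  let best := (PySem.List.pyRange 0 n 1).foldl (fun b i =>
    (PySem.List.pyRange (i + 1) n 1).foldl (fun b j =>
      pvUpdMax b (pvSwapDelta ls lt m i j)) b) (none : Option Int)
  base + best.getD 0   -- best is None only when len(s) < 2 (Python raises TypeError), excluded by Pre_

-- ===== PRECONDITION & SPEC =====
-- A raises ValueError (max of an empty list) when len(s) < 2 and IndexError when len(t) > len(s); exactly those inputs are excluded.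
def Pre_matching_pairs (s : String) (t : String) : Prop :=
  2 ≤ s.toList.length ∧ t.toList.length ≤ s.toList.length
instance (s : String) (t : String) : Decidable (Pre_matching_pairs s t) := by
  unfold Pre_matching_pairs; infer_instance

def pvWitness_matching_pairs : String × String := ("abcd", "adcb")

def Spec_matching_pairs (s : String) (t : String) (out : Int) : Prop := out = matching_pairs_alt s t
instance (s : String) (t : String) (out : Int) : Decidable (Spec_matching_pairs s t out) := by
  unfold Spec_matching_pairs; infer_instance

-- ===== CLAIM (what is proved, stated in full; the proofs are below) =====
def Claim_equal_matching_pairs : Prop := ∀ (s : String) (t : String), Dom_matching_pairs s t → Pre_matching_pairs s t → Spec_matching_pairs s t (matching_pairs s t)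

-- ===== LEMMAS AND PROOFS =====

-- number of positions k < |v| where u[k] == v[k]
def pvCnt (u v : List Char) : Int :=
  ∑ k ∈ Finset.range v.length, (if u[k]? = v[k]? then (1:Int) else 0)

-- change in pvCnt caused by swapping positions i and j of ls
def pvDelta (ls lt : List Char) (i j : Nat) : Int :=
  (if i < lt.length then (if ls[j]? = lt[i]? then (1:Int) else 0) - (if ls[i]? = lt[i]? then (1:Int) else 0) else 0)
  + (if j < lt.length then (if ls[i]? = lt[j]? then (1:Int) else 0) - (if ls[j]? = lt[j]? then (1:Int) else 0) else 0)

-- B's running-max-with-None loop, abstracted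
def pvRunMax (o : Option Int) (l : List Int) : Option Int :=
  l.foldl pvUpdMax o

-- max of a list, 0 for []
def pvMaxD : List Int → Int
  | [] => 0
  | x :: r => r.foldl max x

lemma pv_enum_count (u v : List Char) : ∀ (st a : Int),
    (PySem.List.enumerate v st).foldl (fun acc kv => if PySem.List.pyGet? u kv.1 = some kv.2 then acc + 1 else acc) a
    = a + ∑ k ∈ Finset.range v.length, (if PySem.List.pyGet? u (st + k) = v[k]? then (1:Int) else 0) := by
  induction v with
  | nil => intro st a; simp [PySem.List.enumerate]
  | cons x rest ih =>
    intro st a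
    rw [PySem.List.enumerate_cons]
    simp only [List.foldl_cons, List.length_cons]
    rw [ih (st + 1)]
    rw [Finset.sum_range_succ']
    have h1 : ∀ k : Nat, (x :: rest)[k + 1]? = rest[k]? := by intro k; simp
    simp only [h1]
    have h3 : (∑ k ∈ Finset.range rest.length, (if PySem.List.pyGet? u (st + ((k:Nat) + 1 : Nat)) = rest[k]? then (1:Int) else 0))
        = ∑ k ∈ Finset.range rest.length, (if PySem.List.pyGet? u (st + 1 + (k:Nat)) = rest[k]? then (1:Int) else 0) := by
      apply Finset.sum_congr rfl
      intro k _
      have e : st + ((k : Nat) + 1 : Nat) = st + 1 + (k : Nat) := by push_cast; ring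
      rw [e]
    rw [h3]
    have h4 : (x :: rest)[(0:Nat)]? = some x := by simp
    rw [h4]
    split <;> rename_i hc <;> simp [hc] <;> try omega

lemma pv_range_count (N : Nat) (p : Nat → Prop) [DecidablePred p] (a : Int) :
    (List.range N).foldl (fun acc k => if p k then acc + 1 else acc) a
    = a + ∑ k ∈ Finset.range N, (if p k then (1:Int) else 0) := by
  induction N with
  | zero => simp
  | succ n ih =>
    rw [List.range_succ, List.foldl_append, ih, Finset.sum_range_succ]
    simp only [List.foldl_cons, List.foldl_nil]
    split <;> ring

lemma pv_combos_mem : ∀ (l : List Int), l.Pairwise (· < ·) →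
    ∀ i j : Int, (i, j) ∈ pvCombos2 l → i ∈ l ∧ j ∈ l ∧ i < j := by
  intro l
  induction l with
  | nil => intro _ i j h; simp [pvCombos2] at h
  | cons x rest ih =>
    intro hp i j h
    rw [List.pairwise_cons] at hp
    simp only [pvCombos2, List.mem_append, List.mem_map] at h
    rcases h with ⟨y, hy, hxy⟩ | h
    · obtain ⟨rfl, rfl⟩ : x = i ∧ y = j := by
        exact ⟨congrArg Prod.fst hxy, congrArg Prod.snd hxy⟩
      exact ⟨by simp, by simp [hy], hp.1 _ hy⟩
    · obtain ⟨h1, h2, h3⟩ := ih hp.2 i j h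
      exact ⟨by simp [h1], by simp [h2], h3⟩

lemma pv_nested_fold (F : Option Int → Int → Int → Option Int) (b : Int) :
    ∀ (k : Nat) (a : Int) (acc : Option Int), (b - a).toNat = k →
    (PySem.List.pyRange a b 1).foldl (fun c i => (PySem.List.pyRange (i+1) b 1).foldl (fun c' j => F c' i j) c) acc
    = (pvCombos2 (PySem.List.pyRange a b 1)).foldl (fun c p => F c p.1 p.2) acc := by
  intro k
  induction k with
  | zero =>
    intro a acc hk
    rw [PySem.List.pyRange_one_eq_nil (by omega)]
    simp [pvCombos2]
  | succ n ih =>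
    intro a acc hk
    rw [PySem.List.pyRange_one_cons (by omega)]
    simp only [List.foldl_cons, pvCombos2, List.foldl_append, List.foldl_map]
    exact ih (a + 1) _ (by omega)

lemma pv_runmax_some (l : List Int) : ∀ (x : Int), pvRunMax (some x) l = some (l.foldl max x) := by
  induction l with
  | nil => intro x; simp [pvRunMax]
  | cons d rest ih =>
    intro x
    simp only [pvRunMax, List.foldl_cons, pvUpdMax] at *
    have : (if x < d then some d else some x) = some (max x d) := by split <;> congr 1 <;> omega
    rw [this, ih]

lemma pv_runmax_cons (y : Int) (l : List Int) : pvRunMax none (y :: l) = some (l.foldl max y) := by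
  simp only [pvRunMax, List.foldl_cons]
  exact pv_runmax_some l y

lemma pv_fold_max_shift (base : Int) (f g : Int × Int → Int) :
    ∀ (l : List (Int × Int)) (x : Int), (∀ p ∈ l, f p = base + g p) →
    (l.map f).foldl max (base + x) = base + (l.map g).foldl max x := by
  intro l
  induction l with
  | nil => intro x _; simp
  | cons p rest ih =>
    intro x h
    simp only [List.map_cons, List.foldl_cons]
    rw [h p (by simp), max_add_add_left]
    exact ih _ (fun q hq => h q (by simp [hq]))

lemma pv_get_swap (ls : List Char) (i j : Nat) (hij : i < j) (hj : j < ls.length) (k : Nat) :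
    (ls.take i ++ [ls.getD j ' '] ++ List.take (j - (i+1)) (ls.drop (i+1)) ++ [ls.getD i ' '] ++ ls.drop (j+1))[k]?
    = if k = i then ls[j]? else if k = j then ls[i]? else ls[k]? := by
  have hi : i < ls.length := by omega
  have e1 : min i ls.length = i := by omega
  have e2 : min (j - (i+1)) (ls.length - (i+1)) = j - (i+1) := by omega
  have e3 : ls.getD j ' ' = ls[j] := List.getD_eq_getElem ls ' ' hj
  have e4 : ls.getD i ' ' = ls[i] := List.getD_eq_getElem ls ' ' hi
  simp only [List.getElem?_append, List.getElem?_take, List.getElem?_drop, List.length_append,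
    List.length_take, List.length_drop, List.length_cons, List.length_nil, e1, e2, e3, e4,
    List.getElem?_cons, List.getElem?_nil]
  split_ifs <;> try omega
  all_goals try (congr 1; omega)
  all_goals try (rw [List.getElem?_eq_getElem hj])
  all_goals try (rw [List.getElem?_eq_getElem hi])
  all_goals rfl

lemma pv_sum_delta (ls lt : List Char) (i j : Nat) (hij : i < j) :
    (∑ k ∈ Finset.range lt.length,
      (if (if k = i then ls[j]? else if k = j then ls[i]? else ls[k]?) = lt[k]? then (1:Int) else 0))
    = pvCnt ls lt + pvDelta ls lt i j := by
  have key : ∀ k ∈ Finset.range lt.length,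
      (if (if k = i then ls[j]? else if k = j then ls[i]? else ls[k]?) = lt[k]? then (1:Int) else 0)
      - (if ls[k]? = lt[k]? then (1:Int) else 0)
      = (if i = k then ((if ls[j]? = lt[i]? then (1:Int) else 0) - (if ls[i]? = lt[i]? then (1:Int) else 0)) else 0)
        + (if j = k then ((if ls[i]? = lt[j]? then (1:Int) else 0) - (if ls[j]? = lt[j]? then (1:Int) else 0)) else 0) := by
    intro k _
    rcases eq_or_ne k i with rfl | hki
    · simp [Ne.symm hij.ne]
    · rcases eq_or_ne k j with rfl | hkj
      · simp [hki, Ne.symm hki]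
      · simp [hki, hkj, Ne.symm hki, Ne.symm hkj]
  have h2 : (∑ k ∈ Finset.range lt.length,
      ((if (if k = i then ls[j]? else if k = j then ls[i]? else ls[k]?) = lt[k]? then (1:Int) else 0)
      - (if ls[k]? = lt[k]? then (1:Int) else 0))) = pvDelta ls lt i j := by
    rw [Finset.sum_congr rfl key, Finset.sum_add_distrib, Finset.sum_ite_eq, Finset.sum_ite_eq]
    simp only [Finset.mem_range, pvDelta]
  rw [Finset.sum_sub_distrib] at h2
  unfold pvCnt
  omega

lemma pv_sum_swap (ls lt : List Char) (i j : Nat) (hij : i < j) (hj : j < ls.length) :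
    (∑ k ∈ Finset.range lt.length,
      (if (ls.take i ++ [ls.getD j ' '] ++ List.take (j - (i+1)) (ls.drop (i+1)) ++ [ls.getD i ' '] ++ ls.drop (j+1))[k]? = lt[k]? then (1:Int) else 0))
    = pvCnt ls lt + pvDelta ls lt i j := by
  rw [Finset.sum_congr rfl (fun k _ => by rw [pv_get_swap ls i j hij hj k])]
  exact pv_sum_delta ls lt i j hij

-- A's inner loop for the pair (i, j) counts base matches plus the swap delta
lemma pv_pair_count (ls lt : List Char) (i j : Int)
    (h0 : 0 ≤ i) (hij : i < j) (hj : j < (ls.length : Int)) :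
    (PySem.List.enumerate lt 0).foldl (fun acc kv =>
      if PySem.List.pyGet? (PySem.List.slice ls none (some i) ++ [PySem.List.pyGetD ls j ' ']
        ++ PySem.List.slice ls (some (i + 1)) (some j) ++ [PySem.List.pyGetD ls i ' ']
        ++ PySem.List.slice ls (some (j + 1)) none) kv.1 = some kv.2 then acc + 1 else acc) 0
    = pvCnt ls lt + pvDelta ls lt i.toNat j.toNat := by
  have hset : (PySem.List.slice ls none (some i) ++ [PySem.List.pyGetD ls j ' ']
        ++ PySem.List.slice ls (some (i + 1)) (some j) ++ [PySem.List.pyGetD ls i ' ']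
        ++ PySem.List.slice ls (some (j + 1)) none)
      = ls.take i.toNat ++ [ls.getD j.toNat ' '] ++ List.take (j.toNat - (i.toNat + 1)) (ls.drop (i.toNat + 1))
        ++ [ls.getD i.toNat ' '] ++ ls.drop (j.toNat + 1) := by
    rw [PySem.List.slice_to ls h0, PySem.List.slice_toNat ls (by omega) (by omega),
        PySem.List.slice_from ls (by omega)]
    have g1 := PySem.List.pyGetD_natCast ls j.toNat ' '
    rw [show ((j.toNat : Nat) : Int) = j by omega] at g1
    have g2 := PySem.List.pyGetD_natCast ls i.toNat ' '
    rw [show ((i.toNat : Nat) : Int) = i by omega] at g2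
    have e1 : (i + 1).toNat = i.toNat + 1 := by omega
    have e2 : (j + 1).toNat = j.toNat + 1 := by omega
    rw [g1, g2, e1, e2]
  rw [hset, pv_enum_count]
  have hcast : ∀ k : Nat, ((0:Int) + (k:Int)) = ((k:Nat) : Int) := by intro k; ring
  have hpt : ∀ k ∈ Finset.range lt.length,
      (if PySem.List.pyGet? (ls.take i.toNat ++ [ls.getD j.toNat ' '] ++ List.take (j.toNat - (i.toNat + 1)) (ls.drop (i.toNat + 1))
            ++ [ls.getD i.toNat ' '] ++ ls.drop (j.toNat + 1)) ((0:Int) + (k:Int)) = lt[k]? then (1:Int) else 0)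
      = (if (ls.take i.toNat ++ [ls.getD j.toNat ' '] ++ List.take (j.toNat - (i.toNat + 1)) (ls.drop (i.toNat + 1))
            ++ [ls.getD i.toNat ' '] ++ ls.drop (j.toNat + 1))[k]? = lt[k]? then (1:Int) else 0) := by
    intro k _
    rw [hcast k, PySem.List.pyGet?_natCast]
  rw [Finset.sum_congr rfl hpt, pv_sum_swap ls lt i.toNat j.toNat (by omega) (by omega)]
  ring

-- glue: Python's max over a nonempty mapped list, with mapped values shifted by base
lemma pv_maxD_glue (c : List (Int × Int)) (hne : c ≠ []) (f g : Int × Int → Int) (base : Int)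
    (h : ∀ p ∈ c, f p = base + g p) :
    (PySem.List.max? (c.map f) (fun x => x)).getD 0 = base + pvMaxD (c.map g) := by
  cases c with
  | nil => exact absurd rfl hne
  | cons p rest =>
    simp only [List.map_cons, PySem.List.max?_id_cons, Option.getD_some, pvMaxD]
    rw [h p (by simp)]
    exact pv_fold_max_shift base f g rest (g p) (fun q hq => h q (by simp [hq]))

lemma pv_runmax_glue (c : List (Int × Int)) (hne : c ≠ []) (g : Int × Int → Int) :
    (pvRunMax none (c.map g)).getD 0 = pvMaxD (c.map g) := by
  cases c with
  | nil => exact absurd rfl hne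
  | cons p rest =>
    simp only [List.map_cons, pv_runmax_cons, Option.getD_some, pvMaxD]

lemma pv_range_shape (n : Nat) (h2 : 2 ≤ n) :
    PySem.List.pyRange 0 (n : Int) 1 = 0 :: 1 :: PySem.List.pyRange 2 (n : Int) 1 := by
  rw [PySem.List.pyRange_one_cons (by exact_mod_cast (by omega : (0:Int) < (n:Int)))]
  rw [PySem.List.pyRange_one_cons (by exact_mod_cast (by omega : (1:Int) < (n:Int)))]
  norm_num

lemma pv_combos_ne (n : Nat) (h2 : 2 ≤ n) : pvCombos2 (PySem.List.pyRange 0 (n : Int) 1) ≠ [] := by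
  rw [pv_range_shape n h2]
  simp [pvCombos2]

lemma pv_mem_bounds (n : Nat) (p : Int × Int) (hp : p ∈ pvCombos2 (PySem.List.pyRange 0 (n : Int) 1)) :
    0 ≤ p.1 ∧ p.1 < p.2 ∧ p.2 < (n : Int) := by
  have h := pv_combos_mem _ (PySem.List.pairwise_lt_pyRange_one (a := 0) (b := (n : Int))) p.1 p.2 hp
  rw [PySem.List.mem_pyRange_one, PySem.List.mem_pyRange_one] at h
  exact ⟨h.1.1, h.2.2, h.2.1.2⟩

-- A's port equals base + max of swap deltas
lemma pv_A (s t : String) (h2 : 2 ≤ s.toList.length) :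
    matching_pairs s t = pvCnt s.toList t.toList
      + pvMaxD ((pvCombos2 (PySem.List.pyRange 0 (s.toList.length : Int) 1)).map
          (fun p => pvDelta s.toList t.toList p.1.toNat p.2.toNat)) := by
  simp only [matching_pairs, PySem.Str.len_eq]
  apply pv_maxD_glue _ (pv_combos_ne _ h2)
  intro p hp
  obtain ⟨h0, hij, hj⟩ := pv_mem_bounds _ p hp
  exact pv_pair_count s.toList t.toList p.1 p.2 h0 hij hj

-- B's base loop counts the base matches
lemma pv_base (ls lt : List Char) :
    (PySem.List.pyRange 0 (lt.length : Int) 1).foldl (fun acc k =>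
      if PySem.List.pyGet? ls k = PySem.List.pyGet? lt k then acc + 1 else acc) 0 = pvCnt ls lt := by
  rw [PySem.List.pyRange_one]
  simp only [sub_zero, Int.toNat_natCast, List.foldl_map, zero_add, PySem.List.pyGet?_natCast]
  rw [pv_range_count lt.length (fun k => ls[k]? = lt[k]?) 0]
  simp [pvCnt]

-- B's per-pair delta, converted to Nat indexing
lemma pv_dB (ls lt : List Char) (i j : Int) (h0 : 0 ≤ i) (hij : i < j) :
    pvSwapDelta ls lt (lt.length : Int) i j = pvDelta ls lt i.toNat j.toNat := by
  unfold pvSwapDelta pvDelta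
  have gi : ∀ u : List Char, PySem.List.pyGet? u i = u[i.toNat]? := by
    intro u
    rw [← PySem.List.pyGet?_natCast u i.toNat]; congr 1; omega
  have gj : ∀ u : List Char, PySem.List.pyGet? u j = u[j.toNat]? := by
    intro u
    rw [← PySem.List.pyGet?_natCast u j.toNat]; congr 1; omega
  simp only [gi, gj]
  exact congrArg₂ (· + ·) (if_congr (by omega) rfl rfl) (if_congr (by omega) rfl rfl)

-- B's port equals base + max of swap deltas
lemma pv_B (s t : String) (h2 : 2 ≤ s.toList.length) :
    matching_pairs_alt s t = pvCnt s.toList t.toList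
      + pvMaxD ((pvCombos2 (PySem.List.pyRange 0 (s.toList.length : Int) 1)).map
          (fun p => pvDelta s.toList t.toList p.1.toNat p.2.toNat)) := by
  simp only [matching_pairs_alt, PySem.Str.len_eq]
  rw [pv_base s.toList t.toList]
  congr 1
  rw [pv_nested_fold (fun c i j => pvUpdMax c (pvSwapDelta s.toList t.toList (t.toList.length : Int) i j))
    (s.toList.length : Int) s.toList.length 0 none (by omega)]
  have hstep2 : (pvCombos2 (PySem.List.pyRange 0 (s.toList.length : Int) 1)).foldl
      (fun c p => pvUpdMax c (pvSwapDelta s.toList t.toList (t.toList.length : Int) p.1 p.2)) none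
      = pvRunMax none ((pvCombos2 (PySem.List.pyRange 0 (s.toList.length : Int) 1)).map
          (fun p => pvSwapDelta s.toList t.toList (t.toList.length : Int) p.1 p.2)) := by
    rw [pvRunMax, List.foldl_map]
  rw [hstep2]
  have hmapc : ((pvCombos2 (PySem.List.pyRange 0 (s.toList.length : Int) 1)).map
          (fun p => pvSwapDelta s.toList t.toList (t.toList.length : Int) p.1 p.2))
      = ((pvCombos2 (PySem.List.pyRange 0 (s.toList.length : Int) 1)).map
          (fun p => pvDelta s.toList t.toList p.1.toNat p.2.toNat)) := by
    apply List.map_congr_left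
    intro p hp
    obtain ⟨h0, hij, _⟩ := pv_mem_bounds _ p hp
    exact pv_dB s.toList t.toList p.1 p.2 h0 hij
  rw [hmapc]
  exact pv_runmax_glue _ (pv_combos_ne _ h2) _

-- ===== VERDICT (by name: the statement is the Claim_ definition above) =====
theorem matching_pairs_spec : Claim_equal_matching_pairs := by
  intro s t _ hpre
  unfold Spec_matching_pairs
  obtain ⟨h2, -⟩ := hpre
  rw [pv_A s t h2, pv_B s t h2]
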